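-- pv_equiv track=rewrite | github.com/open-compass/VLMEvalKit | vlmeval/dataset/utils/mmhelix/evaluators/tapa_eval.py | _create_bw_grid
-- ===== SOURCE A (Python) =====
-- from typing import Dict, Any, List, Tuple, Set
--
-- def _create_bw_grid(grid: List[List[str]], clues: Dict[Tuple[int, int], List[int]]) -> List[List[str]]:
--     """创建仅包含B/W的网格，将线索位置标记为W"""
--     bw_grid = []
--
--     # 获取所有线索位置
--     clue_positions = set()
--     for (row, col), numbers in clues.items():
--         # 对于每个线索，标记其占用的位置
--         clue_positions.add((row, col))
--
--     for i in range(len(grid)):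
--         row = []
--         for j in range(len(grid[i])):
--             if (i, j) in clue_positions:
--                 # 线索位置视为白色细胞
--                 row.append('W')
--             else:
--                 row.append(grid[i][j])
--         bw_grid.append(row)
--
--     return bw_grid
-- ===== SOURCE B (Python) =====
-- def _create_bw_grid(grid, clues):
--     """Copy the grid, then overwrite only the in-bounds clue positions with 'W'."""
--     bw_grid = [row[:] for row in grid]
--     for row, col in clues:
--         if 0 <= row < len(bw_grid) and 0 <= col < len(bw_grid[row]):
--             bw_grid[row][col] = 'W'
--     return bw_grid
-- ===== Notes on version B (the rewrite author's own statement) =====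
-- stated objective: simpler
-- what changed: B copies the grid and scatter-writes 'W' only at in-bounds clue positions, instead of A's building a clue-position set and testing membership for every cell of the grid.
import Mathlib
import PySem

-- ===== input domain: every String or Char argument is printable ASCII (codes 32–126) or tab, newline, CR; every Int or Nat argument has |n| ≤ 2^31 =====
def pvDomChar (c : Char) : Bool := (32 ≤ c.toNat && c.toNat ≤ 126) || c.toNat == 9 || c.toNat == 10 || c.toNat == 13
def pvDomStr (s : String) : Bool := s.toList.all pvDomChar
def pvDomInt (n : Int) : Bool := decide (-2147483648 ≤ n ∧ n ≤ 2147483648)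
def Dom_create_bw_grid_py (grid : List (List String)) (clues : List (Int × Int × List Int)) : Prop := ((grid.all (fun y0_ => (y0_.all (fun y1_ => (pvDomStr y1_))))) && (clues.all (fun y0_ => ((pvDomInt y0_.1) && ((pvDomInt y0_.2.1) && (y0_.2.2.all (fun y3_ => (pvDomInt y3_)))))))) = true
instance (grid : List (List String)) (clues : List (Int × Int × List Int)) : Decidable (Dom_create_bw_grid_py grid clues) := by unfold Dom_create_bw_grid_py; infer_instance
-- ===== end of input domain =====

-- B copies the grid and scatter-writes 'W' at the in-bounds clue positions instead of A's per-cell membership test: a simpler decomposition, same cost.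

-- ===== PORT A =====
def create_bw_grid_py (grid : List (List String)) (clues : List (Int × Int × List Int)) : List (List String) :=
  -- clue_positions = set(); for (row, col), numbers in clues.items(): clue_positions.add((row, col))
  let clue_positions : PySem.Set (Int × Int) :=
    clues.foldl (fun s c => PySem.Set.add s (c.1, c.2.1)) PySem.Set.empty
  -- for i in range(len(grid)): row = []; for j in range(len(grid[i])): …; bw_grid.append(row)
  (PySem.List.pyRange 0 (PySem.List.len grid) 1).foldl (fun bw i =>
    let rowlist :=
      (PySem.List.pyRange 0 (PySem.List.len (PySem.List.pyGetD grid i [])) 1).foldl (fun row j =>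
        row ++ [if PySem.Set.contains clue_positions (i, j) then "W"
                else PySem.List.pyGetD (PySem.List.pyGetD grid i []) j ""]) []
    bw ++ [rowlist]) []

-- ===== PORT B =====
def create_bw_grid_py_alt (grid : List (List String)) (clues : List (Int × Int × List Int)) : List (List String) :=
  clues.foldl (fun bw c =>
    if 0 ≤ c.1 ∧ c.1 < PySem.List.len bw ∧ 0 ≤ c.2.1 ∧ c.2.1 < PySem.List.len (PySem.List.pyGetD bw c.1 []) then
      PySem.List.pySetD bw c.1 (PySem.List.pySetD (PySem.List.pyGetD bw c.1 []) c.2.1 "W")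
    else bw)
    (grid.map (fun row => PySem.List.slice row none none))

-- ===== PRECONDITION & SPEC =====
def Spec_create_bw_grid_py (grid : List (List String)) (clues : List (Int × Int × List Int)) (out : List (List String)) : Prop := out = create_bw_grid_py_alt grid clues
instance (grid : List (List String)) (clues : List (Int × Int × List Int)) (out : List (List String)) : Decidable (Spec_create_bw_grid_py grid clues out) := by unfold Spec_create_bw_grid_py; infer_instance

-- ===== CLAIM (what is proved, stated in full; the proofs are below) =====
def Claim_equal_create_bw_grid_py : Prop := ∀ (grid : List (List String)) (clues : List (Int × Int × List Int)), Dom_create_bw_grid_py grid clues → Spec_create_bw_grid_py grid clues (create_bw_grid_py grid clues)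

-- ===== LEMMAS AND PROOFS =====

-- B's fold step, named for the proofs
def pvStep (bw : List (List String)) (c : Int × Int × List Int) : List (List String) :=
  if 0 ≤ c.1 ∧ c.1 < PySem.List.len bw ∧ 0 ≤ c.2.1 ∧ c.2.1 < PySem.List.len (PySem.List.pyGetD bw c.1 []) then
    PySem.List.pySetD bw c.1 (PySem.List.pySetD (PySem.List.pyGetD bw c.1 []) c.2.1 "W")
  else bw

lemma step_len (acc : List (List String)) (c : Int × Int × List Int) :
    (pvStep acc c).length = acc.length := by
  unfold pvStep
  split_ifs with h
  · rcases h with ⟨h1, _⟩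
    obtain ⟨r, hr⟩ : ∃ r : Nat, c.1 = (r : Int) := ⟨c.1.toNat, by omega⟩
    rw [hr, PySem.List.pySetD_natCast]
    exact List.length_set ..
  · rfl

lemma step_row_len (acc : List (List String)) (c : Int × Int × List Int) (i : Nat) :
    ((pvStep acc c).getD i []).length = (acc.getD i []).length := by
  unfold pvStep
  split_ifs with h
  · rcases h with ⟨h1, h2, h3, h4⟩
    obtain ⟨r, hr⟩ : ∃ r : Nat, c.1 = (r : Int) := ⟨c.1.toNat, by omega⟩
    obtain ⟨s, hs⟩ : ∃ s : Nat, c.2.1 = (s : Int) := ⟨c.2.1.toNat, by omega⟩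
    rw [hr, hs, PySem.List.pySetD_natCast, PySem.List.pyGetD_natCast, PySem.List.pySetD_natCast]
    have hrlt : r < acc.length := by rw [hr, PySem.List.len_eq] at h2; exact_mod_cast h2
    by_cases hi : r = i
    · subst hi
      simp [List.getD_eq_getElem?_getD, hrlt]
    · simp [List.getD_eq_getElem?_getD, hi]
  · rfl

lemma step_cell (acc : List (List String)) (c : Int × Int × List Int) (i j : Nat)
    (hi : i < acc.length) (hj : j < (acc.getD i []).length) :
    ((pvStep acc c).getD i []).getD j "" =
      if c.1 = (i : Int) ∧ c.2.1 = (j : Int) then "W" else (acc.getD i []).getD j "" := by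
  unfold pvStep
  split_ifs with h hc hc
  · -- guard true, c hits (i,j)
    rcases hc with ⟨e1, e2⟩
    rw [e1, e2, PySem.List.pySetD_natCast, PySem.List.pyGetD_natCast, PySem.List.pySetD_natCast]
    have hj' : j < acc[i].length := by rwa [List.getD_eq_getElem _ _ hi] at hj
    simp [List.getD_eq_getElem?_getD, hi, hj']
  · -- guard true, c misses (i,j)
    rcases h with ⟨h1, h2, h3, h4⟩
    obtain ⟨r, hr⟩ : ∃ r : Nat, c.1 = (r : Int) := ⟨c.1.toNat, by omega⟩
    obtain ⟨s, hs⟩ : ∃ s : Nat, c.2.1 = (s : Int) := ⟨c.2.1.toNat, by omega⟩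
    rw [hr, hs, PySem.List.pySetD_natCast, PySem.List.pyGetD_natCast, PySem.List.pySetD_natCast]
    by_cases hrow : r = i
    · subst hrow
      have hcol : ¬ s = j := by rintro rfl; exact hc ⟨hr, hs⟩
      simp [List.getD_eq_getElem?_getD, hi, hcol]
    · simp [List.getD_eq_getElem?_getD, hrow]
  · -- guard false but c hits (i,j): impossible, the cell is in bounds
    exfalso
    rcases hc with ⟨e1, e2⟩
    apply h
    rw [e1, e2, PySem.List.len_eq, PySem.List.pyGetD_natCast, PySem.List.len_eq]
    exact ⟨by positivity, by exact_mod_cast hi, by positivity, by exact_mod_cast hj⟩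
  · rfl

lemma foldl_len (clues : List (Int × Int × List Int)) :
    ∀ acc : List (List String), (clues.foldl pvStep acc).length = acc.length := by
  induction clues with
  | nil => intro acc; rfl
  | cons c rest ih => intro acc; rw [List.foldl_cons, ih, step_len]

lemma foldl_row_len (clues : List (Int × Int × List Int)) :
    ∀ (acc : List (List String)) (i : Nat),
      ((clues.foldl pvStep acc).getD i []).length = (acc.getD i []).length := by
  induction clues with
  | nil => intro acc i; rfl
  | cons c rest ih => intro acc i; rw [List.foldl_cons, ih, step_row_len]

lemma foldl_cell (clues : List (Int × Int × List Int)) :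
    ∀ (acc : List (List String)) (i j : Nat), i < acc.length → j < (acc.getD i []).length →
      ((clues.foldl pvStep acc).getD i []).getD j "" =
        if ∃ c ∈ clues, c.1 = (i : Int) ∧ c.2.1 = (j : Int) then "W"
        else (acc.getD i []).getD j "" := by
  induction clues with
  | nil => intro acc i j _ _; simp
  | cons c rest ih =>
    intro acc i j hi hj
    rw [List.foldl_cons,
        ih (pvStep acc c) i j (by rw [step_len]; exact hi) (by rw [step_row_len]; exact hj),
        step_cell acc c i j hi hj]
    by_cases hcrest : ∃ x ∈ rest, x.1 = (i : Int) ∧ x.2.1 = (j : Int)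
    · rw [if_pos hcrest, if_pos ⟨hcrest.choose, List.mem_cons_of_mem _ hcrest.choose_spec.1,
        hcrest.choose_spec.2⟩]
    · rw [if_neg hcrest]
      by_cases hc : c.1 = (i : Int) ∧ c.2.1 = (j : Int)
      · rw [if_pos hc, if_pos ⟨c, List.mem_cons_self .., hc⟩]
      · rw [if_neg hc, if_neg (by
          rintro ⟨x, hx, hxe⟩
          rcases List.mem_cons.mp hx with rfl | hx'
          · exact hc hxe
          · exact hcrest ⟨x, hx', hxe⟩)]

-- the clue-position set of port A is exactly the image list of clues
lemma contains_positions (clues : List (Int × Int × List Int)) (p : Int × Int) :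
    PySem.Set.contains
      (clues.foldl (fun s c => PySem.Set.add s (c.1, c.2.1)) PySem.Set.empty) p = true ↔
      ∃ c ∈ clues, (c.1, c.2.1) = p := by
  have : clues.foldl (fun s c => PySem.Set.add s (c.1, c.2.1)) PySem.Set.empty =
      PySem.Set.ofList (clues.map (fun c => (c.1, c.2.1))) := by
    rw [PySem.Set.ofList_eq_foldl, List.foldl_map]; rfl
  rw [this, PySem.Set.contains_iff, PySem.Set.mem_ofList, List.mem_map]

-- ===== VERDICT (by name: the statement is the Claim_ definition above) =====
theorem create_bw_grid_py_spec : Claim_equal_create_bw_grid_py := by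
  intro grid clues _
  unfold Spec_create_bw_grid_py create_bw_grid_py create_bw_grid_py_alt
  have hinit : grid.map (fun row => PySem.List.slice row none none) = grid := by
    simp [PySem.List.slice_none_none]
  rw [hinit]
  have hB : clues.foldl (fun bw c =>
      if 0 ≤ c.1 ∧ c.1 < PySem.List.len bw ∧ 0 ≤ c.2.1 ∧ c.2.1 < PySem.List.len (PySem.List.pyGetD bw c.1 []) then
        PySem.List.pySetD bw c.1 (PySem.List.pySetD (PySem.List.pyGetD bw c.1 []) c.2.1 "W")
      else bw) grid = clues.foldl pvStep grid := rfl
  rw [hB]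
  -- rewrite A into a map over List.range
  rw [PySem.List.len_eq, PySem.List.pyRange_zero_natCast, List.foldl_map,
      PySem.List.foldl_append_singleton_eq_map (fun i : Nat =>
        (PySem.List.pyRange 0 (PySem.List.len (PySem.List.pyGetD grid (i : Int) [])) 1).foldl (fun row j =>
          row ++ [if PySem.Set.contains
              (clues.foldl (fun s c => PySem.Set.add s (c.1, c.2.1)) PySem.Set.empty) ((i : Int), j) then "W"
            else PySem.List.pyGetD (PySem.List.pyGetD grid (i : Int) []) j ""]) []), List.nil_append]
  apply List.ext_getElem
  · rw [List.length_map, List.length_range, foldl_len]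
  · intro i hi1 hi2
    rw [List.length_map, List.length_range] at hi1
    rw [List.getElem_map, List.getElem_range]
    -- the i-th row of A
    rw [PySem.List.pyGetD_natCast, PySem.List.len_eq, List.getD_eq_getElem _ _ hi1,
        PySem.List.pyRange_zero_natCast, List.foldl_map,
        PySem.List.foldl_append_singleton_eq_map (fun j : Nat =>
          if PySem.Set.contains
              (clues.foldl (fun s c => PySem.Set.add s (c.1, c.2.1)) PySem.Set.empty) ((i : Int), (j : Int)) then "W"
          else PySem.List.pyGetD (grid[i]'hi1) (j : Int) ""),
        List.nil_append]
    apply List.ext_getElem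
    · rw [List.length_map, List.length_range,
          ← List.getD_eq_getElem (List.foldl pvStep grid clues) [] hi2, foldl_row_len,
          List.getD_eq_getElem _ _ hi1]
    · intro j hj1 hj2
      rw [List.length_map, List.length_range] at hj1
      rw [List.getElem_map, List.getElem_range]
      have hjD : j < (grid.getD i []).length := by rw [List.getD_eq_getElem _ _ hi1]; exact hj1
      rw [← List.getD_eq_getElem ((clues.foldl pvStep grid)[i]) "" hj2,
          ← List.getD_eq_getElem (List.foldl pvStep grid clues) ([] : List String) hi2,
          foldl_cell clues grid i j hi1 hjD]
      rw [PySem.List.pyGetD_natCast, List.getD_eq_getElem _ _ hi1]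
      by_cases hmem : ∃ c ∈ clues, c.1 = (i : Int) ∧ c.2.1 = (j : Int)
      · rw [if_pos hmem, if_pos (by
          rw [contains_positions]
          exact ⟨hmem.choose, hmem.choose_spec.1, by
            rw [hmem.choose_spec.2.1, hmem.choose_spec.2.2]⟩)]
      · rw [if_neg hmem, if_neg (by
          intro hcon
          rcases (contains_positions clues ((i : Int), (j : Int))).mp hcon with ⟨c, hc, hce⟩
          exact hmem ⟨c, hc, by rw [Prod.mk.injEq] at hce; exact hce⟩)]
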